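-- pv_equiv track=rewrite | github.com/gwbtc/groundwire | causeway/desktop/causeway.py | format_hoon_ux
-- ===== SOURCE A (Python) =====
-- def format_hoon_ux(hex_str: str) -> str:
--     """Format a hex string as Hoon @ux: 0xdead.beef.cafe.babe"""
--     h = hex_str.lstrip("0") or "0"
--     # Group into chunks of 4 from the right, dot-separated
--     chunks = []
--     while len(h) > 4:
--         chunks.append(h[-4:])
--         h = h[:-4]
--     chunks.append(h)
--     return "0x" + ".".join(reversed(chunks))
-- ===== SOURCE B (Python) =====
-- def format_hoon_ux(hex_str: str) -> str:
--     """Format a hex string as Hoon @ux: 0xdead.beef.cafe.babe"""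
--     h = hex_str.lstrip("0") or "0"
--     # Leading chunk width is len(h) mod 4 (or 4 when len is a multiple of 4);
--     # after it the rest splits evenly into 4s, consumed front to back.
--     r = len(h) % 4 or 4
--     out = "0x" + h[:r]
--     h = h[r:]
--     while h:
--         out += "." + h[:4]
--         h = h[4:]
--     return out
-- ===== Notes on version B (the rewrite author's own statement) =====
-- stated objective: simpler
-- what changed: Replaced the right-to-left while-loop that repeatedly truncates the string (h = h[:-4]), collects chunks in a list, reverses it and joins, by a direct left-to-right recursion that peels the leading chunk (width len%4 or 4) and concatenates with '.', with no list, no reversal and no join.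
import Mathlib
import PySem

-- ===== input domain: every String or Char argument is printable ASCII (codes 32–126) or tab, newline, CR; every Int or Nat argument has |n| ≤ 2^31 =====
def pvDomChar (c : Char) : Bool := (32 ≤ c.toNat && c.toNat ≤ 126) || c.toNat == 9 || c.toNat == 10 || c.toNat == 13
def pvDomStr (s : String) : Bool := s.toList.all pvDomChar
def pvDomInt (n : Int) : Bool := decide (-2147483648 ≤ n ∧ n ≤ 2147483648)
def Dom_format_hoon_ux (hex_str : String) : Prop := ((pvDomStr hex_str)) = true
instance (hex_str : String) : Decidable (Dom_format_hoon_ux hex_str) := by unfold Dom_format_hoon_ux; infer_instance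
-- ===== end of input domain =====

-- B replaces A's right-to-left truncate/collect/reverse/join grouping by a left-to-right
-- loop that peels the leading chunk (width len%4 or 4) and appends '.'-chunks to the
-- output string directly; objective: simpler (no chunk list, no reversal, no join).

-- ===== PORT A =====
-- while len(h) > 4: chunks.append(h[-4:]); h = h[:-4]
-- h[-4:] = drop (len-4), h[:-4] = take (len-4): exact here since 4 < len(h).
def pvLoopA (h : List Char) (chunks : List (List Char)) : List (List Char) :=
  if 4 < h.length then
    pvLoopA (h.take (h.length - 4)) (chunks ++ [h.drop (h.length - 4)])
  else chunks ++ [h]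
termination_by h.length
decreasing_by simp; omega

def format_hoon_ux (hex_str : String) : String :=
  -- h = hex_str.lstrip("0") or "0"  (lstrip("0") drops the leading '0' characters: exact)
  let h0 := hex_str.toList.dropWhile (· == '0')
  let h := if h0 = [] then ['0'] else h0
  let chunks := pvLoopA h []
  String.ofList ('0' :: 'x' :: PySem.Chars.join ['.'] chunks.reverse)

-- ===== PORT B =====
-- while h: out += "." + h[:4]; h = h[4:]   (h[:4] = take 4, h[4:] = drop 4: exact)
def pvLoopB (h : List Char) (out : List Char) : List Char :=
  if hne : h = [] then out
  else pvLoopB (h.drop 4) (out ++ '.' :: h.take 4)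
termination_by h.length
decreasing_by
  have : 0 < h.length := List.length_pos_iff.mpr hne
  simp only [List.length_drop]; omega

def format_hoon_ux_alt (hex_str : String) : String :=
  let h0 := hex_str.toList.dropWhile (· == '0')
  let h := if h0 = [] then ['0'] else h0
  -- r = len(h) % 4 or 4
  let r := if h.length % 4 = 0 then 4 else h.length % 4
  String.ofList (pvLoopB (h.drop r) ('0' :: 'x' :: h.take r))

-- ===== PRECONDITION & SPEC =====
def Spec_format_hoon_ux (hex_str : String) (out : String) : Prop := out = format_hoon_ux_alt hex_str
instance (hex_str : String) (out : String) : Decidable (Spec_format_hoon_ux hex_str out) := by unfold Spec_format_hoon_ux; infer_instance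

-- ===== CLAIM (what is proved, stated in full; the proofs are below) =====
def Claim_equal_format_hoon_ux : Prop := ∀ (hex_str : String), Dom_format_hoon_ux hex_str → Spec_format_hoon_ux hex_str (format_hoon_ux hex_str)

-- ===== LEMMAS AND PROOFS =====

theorem pvLoopA_step (h : List Char) (c : List (List Char)) (hlt : 4 < h.length) :
    pvLoopA h c = pvLoopA (h.take (h.length - 4)) (c ++ [h.drop (h.length - 4)]) := by
  rw [pvLoopA]; simp [hlt]

theorem pvLoopA_stop (h : List Char) (c : List (List Char)) (hge : ¬ 4 < h.length) :
    pvLoopA h c = c ++ [h] := by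
  rw [pvLoopA]; simp [hge]

theorem pvLoopA_acc (n : Nat) : ∀ (h : List Char), h.length ≤ n →
    ∀ c, pvLoopA h c = c ++ pvLoopA h [] := by
  induction n with
  | zero =>
    intro h hl c
    rw [pvLoopA_stop h c (by omega), pvLoopA_stop h [] (by omega)]; simp
  | succ n ih =>
    intro h hl c
    by_cases h4 : 4 < h.length
    · rw [pvLoopA_step h c h4, pvLoopA_step h [] h4,
        ih _ (by simp; omega) (c ++ [h.drop (h.length - 4)]),
        ih _ (by simp; omega) ([] ++ [h.drop (h.length - 4)])]
      simp
    · rw [pvLoopA_stop h c h4, pvLoopA_stop h [] h4]; simp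

theorem pvLoopA_cons (h : List Char) (hlt : 4 < h.length) :
    pvLoopA h [] = h.drop (h.length - 4) :: pvLoopA (h.take (h.length - 4)) [] := by
  rw [pvLoopA_step h [] hlt, pvLoopA_acc (h.take (h.length - 4)).length _ le_rfl]
  simp

-- canonical left-to-right chunk list (the spec both ports compute)
def pvChunks (h : List Char) : List (List Char) :=
  if h.length ≤ 4 then [h]
  else
    let r := if h.length % 4 = 0 then 4 else h.length % 4
    h.take r :: pvChunks (h.drop r)
termination_by h.length
decreasing_by simp only [List.length_drop]; split <;> omega

theorem pvChunks_stop (h : List Char) (hle : h.length ≤ 4) : pvChunks h = [h] := by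
  rw [pvChunks]; simp [hle]

theorem pvChunks_cons (h : List Char) (hgt : ¬ h.length ≤ 4) :
    pvChunks h = h.take (if h.length % 4 = 0 then 4 else h.length % 4) ::
      pvChunks (h.drop (if h.length % 4 = 0 then 4 else h.length % 4)) := by
  rw [pvChunks]; simp [hgt]

theorem pvChunks_ne_nil (h : List Char) : pvChunks h ≠ [] := by
  by_cases hle : h.length ≤ 4
  · rw [pvChunks_stop h hle]; simp
  · rw [pvChunks_cons h hle]; simp

-- popping the last 4-chunk off the canonical chunk list
theorem pvChunks_pop (n : Nat) : ∀ (h : List Char), h.length ≤ n → 4 < h.length →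
    pvChunks h = pvChunks (h.take (h.length - 4)) ++ [h.drop (h.length - 4)] := by
  induction n with
  | zero => intro h hl hgt; omega
  | succ n ih =>
    intro h hl hgt
    set r := if h.length % 4 = 0 then 4 else h.length % 4 with hr
    have hr1 : 1 ≤ r := by rw [hr]; split <;> omega
    have hr4 : r ≤ 4 := by rw [hr]; split <;> omega
    have hrmod : (h.length - r) % 4 = 0 := by rw [hr]; split <;> omega
    clear_value r
    by_cases h8 : h.length ≤ 8
    · have hdr : h.length - r = 4 := by omega
      have hrn : r = h.length - 4 := by omega
      rw [pvChunks_cons h (by omega), ← hr,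
        pvChunks_stop (h.drop r) (by simp only [List.length_drop]; omega),
        pvChunks_stop (h.take (h.length - 4))
          (by simp only [List.length_take]; omega), hrn]
      rfl
    · have hdl : (h.drop r).length = h.length - r := by simp
      have hrd : (if (h.drop r).length % 4 = 0 then 4 else (h.drop r).length % 4) = 4 := by
        simp [hdl, hrmod]
      have htl : (h.take (h.length - 4)).length = h.length - 4 := by
        simp only [List.length_take]; omega
      have hrt : (if (h.take (h.length - 4)).length % 4 = 0 then 4
          else (h.take (h.length - 4)).length % 4) = r := by
        rw [htl, hr]; split <;> (split <;> omega)
      rw [pvChunks_cons h (by omega), ← hr,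
        ih (h.drop r) (by simp only [List.length_drop]; omega)
          (by simp only [List.length_drop]; omega),
        pvChunks_cons (h.take (h.length - 4)) (by rw [htl]; omega), hrt]
      have e1 : (h.take (h.length - 4)).take r = h.take r := by
        rw [List.take_take]; congr 1; omega
      have e2 : (h.drop r).take ((h.drop r).length - 4) = (h.take (h.length - 4)).drop r := by
        rw [hdl, List.drop_take]; congr 1; omega
      have e3 : (h.drop r).drop ((h.drop r).length - 4) = h.drop (h.length - 4) := by
        rw [hdl, List.drop_drop]; congr 1; omega
      rw [e1, e2, e3]; simp

-- A's reversed chunk list is the canonical chunk list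
theorem pvLoopA_eq_chunks (n : Nat) : ∀ (h : List Char), h.length ≤ n →
    (pvLoopA h []).reverse = pvChunks h := by
  induction n with
  | zero =>
    intro h hl
    rw [pvLoopA_stop h [] (by omega), pvChunks_stop h (by omega)]; simp
  | succ n ih =>
    intro h hl
    by_cases h4 : 4 < h.length
    · rw [pvLoopA_cons h h4, pvChunks_pop h.length h le_rfl h4]
      simp only [List.reverse_cons]
      rw [ih (h.take (h.length - 4)) (by simp; omega)]
    · rw [pvLoopA_stop h [] h4, pvChunks_stop h (by omega)]; simp

-- the dot-join of the canonical chunk list, written as B computes it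
def pvDotted (h : List Char) : List Char :=
  if h.length ≤ 4 then h
  else
    let r := if h.length % 4 = 0 then 4 else h.length % 4
    h.take r ++ '.' :: pvDotted (h.drop r)
termination_by h.length
decreasing_by simp only [List.length_drop]; split <;> omega

theorem pvDotted_stop (h : List Char) (hle : h.length ≤ 4) : pvDotted h = h := by
  rw [pvDotted]; simp [hle]

theorem pvDotted_cons (h : List Char) (hgt : ¬ h.length ≤ 4) :
    pvDotted h = h.take (if h.length % 4 = 0 then 4 else h.length % 4) ++
      '.' :: pvDotted (h.drop (if h.length % 4 = 0 then 4 else h.length % 4)) := by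
  rw [pvDotted]; simp [hgt]

theorem pvDotted_eq_join (n : Nat) : ∀ (h : List Char), h.length ≤ n →
    pvDotted h = PySem.Chars.join ['.'] (pvChunks h) := by
  induction n with
  | zero =>
    intro h hl
    rw [pvDotted_stop h (by omega), pvChunks_stop h (by omega),
      PySem.Chars.join_singleton]
  | succ n ih =>
    intro h hl
    by_cases hle : h.length ≤ 4
    · rw [pvDotted_stop h hle, pvChunks_stop h hle, PySem.Chars.join_singleton]
    · rw [pvDotted_cons h hle, pvChunks_cons h hle]
      obtain ⟨c, cs, hcc⟩ : ∃ c cs,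
          pvChunks (h.drop (if h.length % 4 = 0 then 4 else h.length % 4)) = c :: cs := by
        cases hpc : pvChunks (h.drop (if h.length % 4 = 0 then 4 else h.length % 4)) with
        | nil => exact absurd hpc (pvChunks_ne_nil _)
        | cons c cs => exact ⟨c, cs, rfl⟩
      rw [ih _ (by simp only [List.length_drop]; split <;> omega), hcc,
        PySem.Chars.join_cons_cons]
      simp

-- B's loop: the tail it appends after the leading chunk
def pvTailJoin (h : List Char) : List Char :=
  if hne : h = [] then []
  else '.' :: h.take 4 ++ pvTailJoin (h.drop 4)
termination_by h.length
decreasing_by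
  have : 0 < h.length := List.length_pos_iff.mpr hne
  simp only [List.length_drop]; omega

theorem pvTailJoin_nil : pvTailJoin [] = [] := by rw [pvTailJoin]; simp

theorem pvTailJoin_cons (h : List Char) (hne : h ≠ []) :
    pvTailJoin h = '.' :: h.take 4 ++ pvTailJoin (h.drop 4) := by
  rw [pvTailJoin]; simp [hne]

theorem pvLoopB_eq (n : Nat) : ∀ (h : List Char), h.length ≤ n →
    ∀ out, pvLoopB h out = out ++ pvTailJoin h := by
  induction n with
  | zero =>
    intro h hl out
    have hnil : h = [] := List.length_eq_zero_iff.mp (by omega)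
    subst hnil
    rw [pvLoopB, pvTailJoin_nil]; simp
  | succ n ih =>
    intro h hl out
    by_cases hne : h = []
    · subst hne; rw [pvLoopB, pvTailJoin_nil]; simp
    · have hpos : 0 < h.length := List.length_pos_iff.mpr hne
      rw [pvLoopB, pvTailJoin_cons h hne,
        ih (h.drop 4) (by simp only [List.length_drop]; omega)]
      simp [hne]

-- on a nonempty multiple-of-4 tail, B's loop produces '.' ++ the dotted form
theorem pvTailJoin_eq_dotted (n : Nat) : ∀ (t : List Char), t.length ≤ n →
    t.length % 4 = 0 → t ≠ [] → pvTailJoin t = '.' :: pvDotted t := by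
  induction n with
  | zero =>
    intro t hl _ hne
    exact absurd (List.length_eq_zero_iff.mp (by omega)) hne
  | succ n ih =>
    intro t hl hmod hne
    have hpos : 0 < t.length := List.length_pos_iff.mpr hne
    by_cases hle : t.length ≤ 4
    · have h4 : t.length = 4 := by omega
      rw [pvTailJoin_cons t hne, pvDotted_stop t hle,
        List.drop_eq_nil_of_le (by omega), pvTailJoin_nil,
        List.take_of_length_le (by omega)]
      simp
    · have hdm : (t.drop 4).length % 4 = 0 := by simp only [List.length_drop]; omega
      have hdn : t.drop 4 ≠ [] := by
        intro he
        have := congrArg List.length he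
        simp only [List.length_drop, List.length_nil] at this
        omega
      rw [pvTailJoin_cons t hne, pvDotted_cons t hle,
        ih (t.drop 4) (by simp only [List.length_drop]; omega) hdm hdn]
      have : (if t.length % 4 = 0 then 4 else t.length % 4) = 4 := by
        simp [hmod]
      rw [this]; simp

-- the dotted form splits as leading chunk ++ tail
theorem pvDotted_split (h : List Char) (hne : h ≠ []) :
    pvDotted h = h.take (if h.length % 4 = 0 then 4 else h.length % 4) ++
      pvTailJoin (h.drop (if h.length % 4 = 0 then 4 else h.length % 4)) := by
  have hpos : 0 < h.length := List.length_pos_iff.mpr hne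
  set r := if h.length % 4 = 0 then 4 else h.length % 4 with hr
  have hr1 : 1 ≤ r := by rw [hr]; split <;> omega
  have hr4 : r ≤ 4 := by rw [hr]; split <;> omega
  have hrmod : (h.length - r) % 4 = 0 := by rw [hr]; split <;> omega
  by_cases hle : h.length ≤ r
  · rw [pvDotted_stop h (by omega), List.take_of_length_le hle,
      List.drop_eq_nil_of_le hle, pvTailJoin_nil]
    simp
  · have hgt : ¬ h.length ≤ 4 := by
      intro hc
      rw [hr] at hle; split at hle <;> omega
    have hdm : (h.drop r).length % 4 = 0 := by simp only [List.length_drop]; omega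
    have hdn : h.drop r ≠ [] := by
      intro he
      have := congrArg List.length he
      simp only [List.length_drop, List.length_nil] at this
      omega
    rw [pvDotted_cons h hgt, ← hr,
      pvTailJoin_eq_dotted (h.drop r).length (h.drop r) le_rfl hdm hdn]

-- ===== VERDICT (by name: the statement is the Claim_ definition above) =====
theorem format_hoon_ux_spec : Claim_equal_format_hoon_ux := by
  intro hex_str _dom
  unfold Spec_format_hoon_ux format_hoon_ux format_hoon_ux_alt
  simp only []
  set h0 := hex_str.toList.dropWhile (· == '0') with hh0
  set h : List Char := if h0 = [] then ['0'] else h0 with hh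
  have hne : h ≠ [] := by
    rw [hh]; split
    · simp
    · assumption
  rw [pvLoopA_eq_chunks h.length h le_rfl, ← pvDotted_eq_join h.length h le_rfl,
    pvLoopB_eq (h.drop (if h.length % 4 = 0 then 4 else h.length % 4)).length _ le_rfl,
    pvDotted_split h hne]
  simp
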